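-- pv_equiv track=rewrite | github.com/xianer235/115-media-hub | app/services/subscription_episode.py | _format_episode_preview
-- ===== SOURCE A (Python) =====
-- from typing import Any, Dict, List, Optional, Set, Tuple
--
-- def _format_episode_preview(episodes: Set[int], max_items: int = 8) -> str:
--     ordered = sorted(max(0, int(item or 0)) for item in episodes if int(item or 0) > 0)
--     if not ordered:
--         return "--"
--     if len(ordered) <= max_items:
--         return "、".join([f"E{episode}" for episode in ordered])
--     head = "、".join([f"E{episode}" for episode in ordered[:3]])
--     tail = "、".join([f"E{episode}" for episode in ordered[-2:]])
--     return f"{head} ... {tail}"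
-- ===== SOURCE B (Python) =====
-- import heapq
--
--
-- def _format_episode_preview(episodes, max_items=8):
--     values = [v for v in (int(e or 0) for e in episodes) if v > 0]
--     if not values:
--         return "--"
--     if len(values) <= max_items:
--         return "、".join(f"E{v}" for v in sorted(values))
--     head = heapq.nsmallest(3, values)
--     tail = list(reversed(heapq.nlargest(2, values)))
--     return "、".join(f"E{v}" for v in head) + " ... " + "、".join(f"E{v}" for v in tail)
-- ===== Notes on version B (the rewrite author's own statement) =====
-- stated objective: alternative
-- what changed: Materializes the positive values once, sorts only when the full list is shown, and otherwise selects the 3 smallest / 2 largest via heapq bounded selection instead of sorting the whole collection.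
import Mathlib
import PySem

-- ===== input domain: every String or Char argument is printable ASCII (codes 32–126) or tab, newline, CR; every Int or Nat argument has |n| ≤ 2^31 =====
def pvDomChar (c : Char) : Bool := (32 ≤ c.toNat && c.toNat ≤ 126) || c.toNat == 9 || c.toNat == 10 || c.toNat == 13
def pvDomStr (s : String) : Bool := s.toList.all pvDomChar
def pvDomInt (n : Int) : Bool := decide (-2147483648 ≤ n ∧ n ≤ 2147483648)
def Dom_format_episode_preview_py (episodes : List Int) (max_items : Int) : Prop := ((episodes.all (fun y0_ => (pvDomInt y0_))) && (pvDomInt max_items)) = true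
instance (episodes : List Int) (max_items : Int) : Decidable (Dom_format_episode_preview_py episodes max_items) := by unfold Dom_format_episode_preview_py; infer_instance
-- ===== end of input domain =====

-- B replaces the always-sort pipeline by a one-pass materialization of the positives, sorting only
-- when everything is shown and using heapq bounded selection (nsmallest/nlargest) in the truncated
-- branch; same return value, stated as an alternative decomposition (no speed claim).

-- ===== PORT A =====
-- int(item or 0)
def pvIval (x : Int) : Int := if x == 0 then 0 else x

def format_episode_preview_py (episodes : List Int) (max_items : Int) : String :=
  let ordered := PySem.List.sorted
    ((episodes.filter (fun item => decide (0 < pvIval item))).map (fun item => max 0 (pvIval item)))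
    (fun x => x) false
  if ordered = [] then "--"
  else if (ordered.length : Int) ≤ max_items then
    PySem.Str.join "、" (ordered.map (fun e => "E" ++ PySem.Int.toStr e))
  else
    let head := PySem.Str.join "、"
      ((PySem.List.slice ordered none (some 3)).map (fun e => "E" ++ PySem.Int.toStr e))
    let tail := PySem.Str.join "、"
      ((PySem.List.slice ordered (some (-2)) none).map (fun e => "E" ++ PySem.Int.toStr e))
    head ++ " ... " ++ tail

-- ===== PORT B =====
-- heapq.nsmallest(k, xs) / heapq.nlargest(k, xs) ported as their documented contract:
-- sorted(xs)[:k] and sorted(xs, reverse=True)[:k]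
def pvNSmallest (k : Nat) (xs : List Int) : List Int :=
  (PySem.List.sorted xs (fun x => x) false).take k
def pvNLargest (k : Nat) (xs : List Int) : List Int :=
  (PySem.List.sorted xs (fun x => x) true).take k

def format_episode_preview_py_alt (episodes : List Int) (max_items : Int) : String :=
  let values := (episodes.map (fun e => if e == 0 then 0 else e)).filter (fun v => decide (0 < v))
  if values = [] then "--"
  else if (values.length : Int) ≤ max_items then
    PySem.Str.join "、"
      ((PySem.List.sorted values (fun x => x) false).map (fun v => "E" ++ PySem.Int.toStr v))
  else
    let head := pvNSmallest 3 values
    let tail := (pvNLargest 2 values).reverse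
    PySem.Str.join "、" (head.map (fun v => "E" ++ PySem.Int.toStr v)) ++ " ... " ++
      PySem.Str.join "、" (tail.map (fun v => "E" ++ PySem.Int.toStr v))

-- ===== PRECONDITION & SPEC =====
def Spec_format_episode_preview_py (episodes : List Int) (max_items : Int) (out : String) : Prop := out = format_episode_preview_py_alt episodes max_items
instance (episodes : List Int) (max_items : Int) (out : String) : Decidable (Spec_format_episode_preview_py episodes max_items out) := by unfold Spec_format_episode_preview_py; infer_instance

-- ===== CLAIM (what is proved, stated in full; the proofs are below) =====
def Claim_equal_format_episode_preview_py : Prop := ∀ (episodes : List Int) (max_items : Int), Dom_format_episode_preview_py episodes max_items → Spec_format_episode_preview_py episodes max_items (format_episode_preview_py episodes max_items)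

-- ===== LEMMAS AND PROOFS =====

theorem pvIval_eq (x : Int) : pvIval x = x := by
  unfold pvIval; split <;> simp_all

-- A's filtered-and-mapped source list equals B's values list
theorem pv_lists_eq (episodes : List Int) :
    (episodes.filter (fun item => decide (0 < pvIval item))).map (fun item => max 0 (pvIval item))
      = (episodes.map (fun e => if e == 0 then 0 else e)).filter (fun v => decide (0 < v)) := by
  have h1 : (episodes.map (fun e => if e == 0 then 0 else e)) = episodes :=
    (List.map_congr_left (fun x _ => pvIval_eq x)).trans (List.map_id episodes)
  rw [h1]
  simp only [pvIval_eq]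
  rw [List.map_congr_left (fun x hx => by
    have : 0 < x := by simpa using (List.of_mem_filter hx)
    show max 0 x = x
    omega)]
  exact List.map_id _

-- descending sort of an Int list (identity key) is the reverse of the ascending sort
theorem pv_sorted_rev_eq_reverse (xs : List Int) :
    PySem.List.sorted xs (fun x => x) true = (PySem.List.sorted xs (fun x => x) false).reverse := by
  apply List.Perm.eq_of_pairwise (le := fun a b : Int => b ≤ a)
  · exact fun a b _ _ h1 h2 => le_antisymm h2 h1
  · exact PySem.List.sorted_pairwise_rev xs _
  · exact (List.pairwise_reverse).mpr (PySem.List.sorted_pairwise xs _)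
  · exact (PySem.List.sorted_perm xs _ true).trans
      ((PySem.List.sorted_perm xs _ false).symm.trans (List.reverse_perm _).symm)

theorem format_episode_preview_py_spec_aux (episodes : List Int) (max_items : Int) :
    format_episode_preview_py episodes max_items = format_episode_preview_py_alt episodes max_items := by
  unfold format_episode_preview_py format_episode_preview_py_alt
  rw [pv_lists_eq]
  generalize ((episodes.map (fun e => if e == 0 then 0 else e)).filter (fun v => decide (0 < v))) = values
  by_cases h0 : values = []
  · simp [h0, PySem.List.sorted_eq_nil_iff]
  · rw [if_neg (by simpa [PySem.List.sorted_eq_nil_iff] using h0), if_neg h0,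
       PySem.List.length_sorted]
    by_cases h1 : (values.length : Int) ≤ max_items
    · rw [if_pos h1, if_pos h1]
    · rw [if_neg h1, if_neg h1]
      dsimp only
      congr 2
      · -- head: ordered[:3] = nsmallest 3
        rw [PySem.List.slice_to _ (show (0:Int) ≤ 3 by norm_num)]
        rfl
      · -- tail: ordered[-2:] = reverse (nlargest 2)
        rw [PySem.List.slice_from_neg_ofNat _ 2 (by norm_num)]
        unfold pvNLargest
        rw [pv_sorted_rev_eq_reverse, List.take_reverse, List.reverse_reverse,
            PySem.List.length_sorted]

-- ===== VERDICT (by name: the statement is the Claim_ definition above) =====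
theorem format_episode_preview_py_spec : Claim_equal_format_episode_preview_py := by
  intro episodes max_items _
  exact format_episode_preview_py_spec_aux episodes max_items
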